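-- pv_equiv track=rewrite | github.com/SalRaad25/Python-old | A02/A02_0300025357/a2_part2_0300025357.py | oPify
-- ===== SOURCE A (Python) =====
-- def oPify(s):
--     '''(str) -> str
--     Returns a string with 'op' inserted between every two consecutive alphabets'''
--
--     new_build = ''
--     for i in range(len(s)):
--         if i < len(s) - 1:
--             if s[i].isalpha() == True and s[i+1].isalpha() == True:
--                 if s[i].isupper() == True:
--                     new_build = new_build + s[i] + 'O'
--                 else:
--                     new_build = new_build + s[i] + 'o'
--                 if s[i+1].isupper() == True:
--                     new_build = new_build + 'P'
--                 else:
--                     new_build = new_build + 'p'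
--             else:
--                 new_build = new_build + s[i]
--         else:
--             new_build = new_build + s[i]
--     return new_build
-- ===== SOURCE B (Python) =====
-- def oPify(s):
--     # Two-stage strategy: split s into maximal alphabetic runs (non-letters pass
--     # through verbatim), then decorate each run by per-character position rules:
--     # every char after the first is preceded by its 'P'/'p', every char before
--     # the last is followed by its 'O'/'o'.
--     def mark(w):
--         parts = []
--         last = len(w) - 1
--         for j in range(len(w)):
--             c = w[j]
--             if j > 0:
--                 parts.append('P' if c.isupper() else 'p')
--             parts.append(c)
--             if j < last:
--                 parts.append('O' if c.isupper() else 'o')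
--         return ''.join(parts)
--
--     out = []
--     i, n = 0, len(s)
--     while i < n:
--         if s[i].isalpha():
--             j = i + 1
--             while j < n and s[j].isalpha():
--                 j += 1
--             out.append(mark(s[i:j]))
--             i = j
--         else:
--             out.append(s[i])
--             i += 1
--     return ''.join(out)
-- ===== Notes on version B (the rewrite author's own statement) =====
-- stated objective: faster
-- what changed: Instead of scanning index pairs with a growing accumulator, B segments the string into maximal alphabetic runs (non-letters copied verbatim) and decorates each run by a per-character position rule (every non-first letter is preceded by its 'P'/'p', every non-last letter followed by its 'O'/'o'), joining the pieces once at the end.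
import Mathlib
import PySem

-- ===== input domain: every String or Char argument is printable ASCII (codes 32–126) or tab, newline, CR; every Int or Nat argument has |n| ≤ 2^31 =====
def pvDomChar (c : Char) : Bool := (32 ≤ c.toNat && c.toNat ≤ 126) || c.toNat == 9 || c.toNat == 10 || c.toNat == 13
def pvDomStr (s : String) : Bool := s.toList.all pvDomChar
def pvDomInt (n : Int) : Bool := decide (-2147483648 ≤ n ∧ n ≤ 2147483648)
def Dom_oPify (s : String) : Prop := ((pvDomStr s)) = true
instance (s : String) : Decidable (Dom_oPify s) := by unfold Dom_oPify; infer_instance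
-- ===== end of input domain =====

-- B replaces A's index-pair scan with a two-stage algorithm: segment the string into
-- maximal alphabetic runs, then decorate each run by per-character position rules.

-- ===== PORT A =====
-- one iteration of A's loop body (nb = new_build, i = loop index), reading the chars of s
def oPifyStep (cs : List Char) (nb : List Char) (i : Int) : List Char :=
  if i < (cs.length : Int) - 1 then
    if PySem.Chars.isalpha (PySem.List.pyGetD cs i ' ') && PySem.Chars.isalpha (PySem.List.pyGetD cs (i+1) ' ') then
      let nb1 := if PySem.Chars.isupper (PySem.List.pyGetD cs i ' ')
                 then nb ++ [PySem.List.pyGetD cs i ' ', 'O']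
                 else nb ++ [PySem.List.pyGetD cs i ' ', 'o']
      if PySem.Chars.isupper (PySem.List.pyGetD cs (i+1) ' ') then nb1 ++ ['P'] else nb1 ++ ['p']
    else nb ++ [PySem.List.pyGetD cs i ' ']
  else nb ++ [PySem.List.pyGetD cs i ' ']

def oPify (s : String) : String :=
  let cs := s.toList
  String.mk ((PySem.List.pyRange 0 (cs.length : Int) 1).foldl (oPifyStep cs) [])

-- ===== PORT B =====
-- 'P' if c.isupper() else 'p' (resp. 'O'/'o') from Source B's mark
def oPifyPOf (c : Char) : Char := if PySem.Chars.isupper c then 'P' else 'p'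
def oPifyOOf (c : Char) : Char := if PySem.Chars.isupper c then 'O' else 'o'

-- mark's `for j in range(len(w))` loop, as structural recursion carrying the index j
def oPifyMarkGo (last : Nat) : Nat → List Char → List Char
  | _, [] => []
  | j, c :: t =>
      (if 0 < j then [oPifyPOf c] else []) ++ [c] ++
      (if j < last then [oPifyOOf c] else []) ++ oPifyMarkGo last (j + 1) t

-- mark(w) from Source B: decorate one maximal alphabetic run
def oPifyMark (w : List Char) : List Char := oPifyMarkGo (w.length - 1) 0 w

-- Source B's outer while loop: the inner `while j < n and s[j].isalpha()` scan is
-- takeWhile/dropWhile on the remaining suffix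
def oPifyGo : List Char → List Char
  | [] => []
  | c :: t =>
      if h : PySem.Chars.isalpha c then
        oPifyMark ((c :: t).takeWhile PySem.Chars.isalpha) ++
          oPifyGo ((c :: t).dropWhile PySem.Chars.isalpha)
      else
        c :: oPifyGo t
termination_by l => l.length
decreasing_by
  · rw [List.dropWhile_cons_of_pos h]
    have := List.length_dropWhile_le PySem.Chars.isalpha t
    simp only [List.length_cons]; omega
  · simp

def oPify_alt (s : String) : String := String.mk (oPifyGo s.toList)

-- ===== PRECONDITION & SPEC =====
def Spec_oPify (s : String) (out : String) : Prop := out = oPify_alt s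
instance (s : String) (out : String) : Decidable (Spec_oPify s out) := by unfold Spec_oPify; infer_instance

-- ===== CLAIM (what is proved, stated in full; the proofs are below) =====
def Claim_equal_oPify : Prop := ∀ (s : String), Dom_oPify s → Spec_oPify s (oPify s)

-- ===== LEMMAS AND PROOFS =====

-- the separator A emits between an adjacent pair (proof-side characterisation)
def oPifySep (a b : Char) : List Char :=
  if PySem.Chars.isalpha a && PySem.Chars.isalpha b then [oPifyOOf a, oPifyPOf b] else []

-- "pair form": A's output characterised as a pass over adjacent pairs plus the last char
def pairForm (cs : List Char) : List Char :=
  ((cs.zip cs.tail).flatMap (fun p => p.1 :: oPifySep p.1 p.2)) ++ cs.drop (cs.length - 1)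

theorem pairForm_nil : pairForm [] = [] := rfl

theorem pairForm_single (a : Char) : pairForm [a] = [a] := rfl

theorem pairForm_cons₂ (a b : Char) (t : List Char) :
    pairForm (a :: b :: t) = a :: (oPifySep a b ++ pairForm (b :: t)) := by
  simp [pairForm]

-- ---- A's loop equals the pair form ----

-- shifting the loop: iterating A's body over indices 1..n+1 of (a :: t) is iterating it over 0..n of t
theorem oPify_shift (a : Char) (t : List Char) (acc : List Char) :
    (PySem.List.pyRange 1 ((t.length : Int) + 1) 1).foldl (oPifyStep (a :: t)) acc
      = (PySem.List.pyRange 0 (t.length : Int) 1).foldl (oPifyStep t) acc := by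
  rw [PySem.List.pyRange_one 1 ((t.length : Int) + 1), PySem.List.pyRange_one 0 (t.length : Int)]
  rw [show ((t.length : Int) + 1 - 1).toNat = t.length from by omega,
      show ((t.length : Int) - 0).toNat = t.length from by omega]
  rw [List.foldl_map, List.foldl_map]
  have hfun : (fun (x : List Char) (y : Nat) => oPifyStep (a :: t) x (1 + (y : Int)))
      = (fun (x : List Char) (y : Nat) => oPifyStep t x (0 + (y : Int))) := by
    funext x k
    have h1 : PySem.List.pyGetD (a :: t) (1 + (k : Int)) ' ' = PySem.List.pyGetD t ((0 : Int) + (k : Int)) ' ' := by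
      rw [show (1 + (k : Int)) = ((k + 1 : Nat) : Int) from by push_cast; ring,
          show ((0 : Int) + (k : Int)) = ((k : Nat) : Int) from by ring,
          PySem.List.pyGetD_natCast, PySem.List.pyGetD_natCast]
      rfl
    have h2 : PySem.List.pyGetD (a :: t) (1 + (k : Int) + 1) ' ' = PySem.List.pyGetD t ((0 : Int) + (k : Int) + 1) ' ' := by
      rw [show (1 + (k : Int) + 1) = ((k + 2 : Nat) : Int) from by push_cast; ring,
          show ((0 : Int) + (k : Int) + 1) = ((k + 1 : Nat) : Int) from by push_cast; ring,
          PySem.List.pyGetD_natCast, PySem.List.pyGetD_natCast]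
      rfl
    have h3 : (1 + (k : Int) < (((a :: t).length : Int)) - 1) ↔ ((0 : Int) + (k : Int) < (t.length : Int) - 1) := by
      simp; omega
    simp only [oPifyStep]
    rw [h1, h2]
    exact if_congr h3 rfl rfl
  rw [hfun]

-- A's loop produces the pair form appended to the accumulator
theorem oPify_loop_eq : ∀ (cs : List Char) (acc : List Char),
    (PySem.List.pyRange 0 (cs.length : Int) 1).foldl (oPifyStep cs) acc = acc ++ pairForm cs
  | [], acc => by simp [pairForm]
  | [a], acc => by
      rw [show ((([a] : List Char).length : Int)) = 0 + 1 from by simp]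
      rw [PySem.List.pyRange_one_singleton]
      simp [oPifyStep, PySem.List.pyGetD, pairForm]
  | a :: b :: t, acc => by
      have hn : (0 : Int) < ((a :: b :: t).length : Int) := by simp only [List.length_cons]; push_cast; omega
      rw [PySem.List.pyRange_one_cons hn]
      simp only [List.foldl_cons]
      rw [show (0 : Int) + 1 = 1 from rfl]
      have hlen : ((a :: b :: t).length : Int) = ((b :: t).length : Int) + 1 := by simp
      rw [hlen, oPify_shift a (b :: t), oPify_loop_eq (b :: t)]
      have hstep : oPifyStep (a :: b :: t) acc 0 = acc ++ (a :: oPifySep a b) := by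
        simp only [oPifyStep, oPifySep, oPifyOOf, oPifyPOf]
        have g0 : PySem.List.pyGetD (a :: b :: t) (0 : Int) ' ' = a := by
          rw [show (0 : Int) = ((0 : Nat) : Int) from rfl, PySem.List.pyGetD_natCast]; rfl
        have g1 : PySem.List.pyGetD (a :: b :: t) ((0 : Int) + 1) ' ' = b := by
          rw [show (0 : Int) + 1 = ((1 : Nat) : Int) from rfl, PySem.List.pyGetD_natCast]; rfl
        rw [g0, g1, if_pos (show (0 : Int) < (((a :: b :: t).length : Int)) - 1 from by simp only [List.length_cons]; push_cast; omega)]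
        by_cases hab : (PySem.Chars.isalpha a && PySem.Chars.isalpha b) = true
        · rw [if_pos hab, if_pos hab]
          by_cases hu : PySem.Chars.isupper a = true <;>
            by_cases hv : PySem.Chars.isupper b = true <;> simp [hu, hv]
        · rw [if_neg hab, if_neg hab]
      rw [hstep, pairForm_cons₂]
      simp

-- ---- B equals the pair form ----

-- mark's indexed loop on an all-alphabetic run, generalised over the start index j
theorem oPifyMarkGo_eq : ∀ (t : List Char) (c : Char) (j : Nat),
    (∀ x ∈ c :: t, PySem.Chars.isalpha x = true) →
    oPifyMarkGo (j + t.length) j (c :: t)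
      = (if 0 < j then [oPifyPOf c] else []) ++ pairForm (c :: t)
  | [], c, j, _ => by
      simp [oPifyMarkGo, pairForm_single]
  | b :: t', c, j, hall => by
      have hc : PySem.Chars.isalpha c = true := hall c List.mem_cons_self
      have hb : PySem.Chars.isalpha b = true := hall b (by simp)
      have hall' : ∀ x ∈ b :: t', PySem.Chars.isalpha x = true := fun x hx => hall x (by simp [hx])
      have ih := oPifyMarkGo_eq t' b (j + 1) hall'
      rw [show j + (b :: t').length = (j + 1) + t'.length from by simp; omega] at *
      conv_lhs => rw [oPifyMarkGo]
      rw [ih, if_pos (show j < j + 1 + t'.length from by omega)]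
      rw [pairForm_cons₂]
      simp [oPifySep, hc, hb]

-- mark of a nonempty all-alphabetic run is its pair form
theorem oPifyMark_eq (c : Char) (t : List Char)
    (hall : ∀ x ∈ c :: t, PySem.Chars.isalpha x = true) :
    oPifyMark (c :: t) = pairForm (c :: t) := by
  have := oPifyMarkGo_eq t c 0 hall
  simpa [oPifyMark] using this

-- the pair form splits at a run boundary (next char not alphabetic)
theorem pairForm_append : ∀ (r : List Char), r ≠ [] → ∀ (d : Char) (t' : List Char),
    PySem.Chars.isalpha d = false →
    pairForm (r ++ d :: t') = pairForm r ++ pairForm (d :: t')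
  | [], h, _, _, _ => absurd rfl h
  | [a], _, d, t', hd => by
      rw [show ([a] : List Char) ++ d :: t' = a :: d :: t' from rfl, pairForm_cons₂]
      simp [oPifySep, hd, pairForm_single]
  | a :: b :: r', _, d, t', hd => by
      have ih := pairForm_append (b :: r') (by simp) d t' hd
      simp only [List.cons_append] at ih
      rw [show (a :: b :: r') ++ d :: t' = a :: b :: (r' ++ d :: t') from rfl,
          pairForm_cons₂, ih, pairForm_cons₂]
      simp

-- B's segmentation recursion equals the pair form
theorem oPifyGo_eq (cs : List Char) : oPifyGo cs = pairForm cs := by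
  induction cs using oPifyGo.induct with
  | case1 => simp [oPifyGo, pairForm_nil]
  | case2 c t h ih =>
      rw [oPifyGo, dif_pos h]
      rw [List.takeWhile_cons_of_pos h, List.dropWhile_cons_of_pos h] at *
      have hall : ∀ x ∈ c :: t.takeWhile PySem.Chars.isalpha, PySem.Chars.isalpha x = true := by
        intro x hx
        rcases List.mem_cons.mp hx with h1 | h2
        · rw [h1]; exact h
        · exact List.mem_takeWhile_imp h2
      rw [oPifyMark_eq _ _ hall, ih]
      have hsplit : c :: t = (c :: t.takeWhile PySem.Chars.isalpha) ++ t.dropWhile PySem.Chars.isalpha := by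
        simp [List.takeWhile_append_dropWhile]
      cases hrest : t.dropWhile PySem.Chars.isalpha with
      | nil =>
          rw [hrest] at hsplit
          rw [pairForm_nil, List.append_nil]
          conv_rhs => rw [hsplit]
          simp
      | cons d t' =>
          have hdna : PySem.Chars.isalpha d = false := by
            have hw : List.dropWhile PySem.Chars.isalpha t ≠ [] := by rw [hrest]; simp
            have hnot := List.head_dropWhile_not PySem.Chars.isalpha (l := t) (w := hw)
            have hh : (List.dropWhile PySem.Chars.isalpha t).head hw = d := by
              simp [hrest]
            rwa [hh] at hnot
          rw [hrest] at hsplit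
          conv_rhs => rw [hsplit]
          rw [pairForm_append (c :: t.takeWhile PySem.Chars.isalpha) (by simp) d t' hdna]
  | case3 c t h ih =>
      rw [oPifyGo, dif_neg h, ih]
      cases t with
      | nil => simp [pairForm_single, pairForm_nil]
      | cons b t' =>
          rw [pairForm_cons₂]
          have hna : PySem.Chars.isalpha c = false := by
            cases hc : PySem.Chars.isalpha c
            · rfl
            · exact absurd hc h
          simp [oPifySep, hna]

-- ===== VERDICT (by name: the statement is the Claim_ definition above) =====
theorem oPify_spec : Claim_equal_oPify := by
  intro s _
  show oPify s = oPify_alt s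
  unfold oPify oPify_alt
  dsimp only
  rw [oPify_loop_eq s.toList [], oPifyGo_eq, List.nil_append]
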